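-- pv_equiv track=rewrite | github.com/mir12lyy-cloud/my_things | selectNames/core.py | count
-- ===== SOURCE A (Python) =====
-- def count(name_list):
--   male_list, female_list = [], []
--   for name in name_list:
--     if 'b' in name:
--       male_list.append(name[:-1])
--     elif 'g' in name:
--       female_list.append(name[:-1])
--     else:
--       return [[], []]
--   return [male_list, female_list]
-- ===== SOURCE B (Python) =====
-- def count(name_list):
--   if not all(('b' in n) or ('g' in n) for n in name_list):
--     return [[], []]
--   return [[n[:-1] for n in name_list if 'b' in n],
--           [n[:-1] for n in name_list if 'g' in n and 'b' not in n]]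
-- ===== Notes on version B (the rewrite author's own statement) =====
-- stated objective: simpler
-- what changed: Replaces the single accumulating loop with an early return by a separate validity scan followed by two filter-and-trim comprehensions, one per gender.
import Mathlib
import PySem

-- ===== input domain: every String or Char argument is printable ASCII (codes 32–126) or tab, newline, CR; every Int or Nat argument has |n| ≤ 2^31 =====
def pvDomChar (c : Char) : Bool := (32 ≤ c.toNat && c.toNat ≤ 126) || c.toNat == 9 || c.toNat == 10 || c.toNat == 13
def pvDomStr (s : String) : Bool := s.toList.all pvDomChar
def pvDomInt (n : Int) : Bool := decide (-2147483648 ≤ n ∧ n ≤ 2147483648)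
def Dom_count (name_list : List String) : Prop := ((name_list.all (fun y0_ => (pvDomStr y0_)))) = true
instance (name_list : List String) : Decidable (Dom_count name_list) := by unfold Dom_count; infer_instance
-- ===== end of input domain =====

-- B restructures A's single accumulating loop (with its early return) into a validity scan
-- followed by two filter-and-trim comprehensions; objective: simpler.

-- ===== PORT A =====
-- A's loop: accumulators male/female, early return [[],[]] on an invalid name.
def countGo (ms fs : List String) : List String → List (List String)
  | [] => [ms, fs]
  | n :: rest =>
    if PySem.Str.isIn "b" n then
      countGo (ms ++ [PySem.Str.slice n none (some (-1))]) fs rest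
    else if PySem.Str.isIn "g" n then
      countGo ms (fs ++ [PySem.Str.slice n none (some (-1))]) rest
    else [[], []]

def count (name_list : List String) : List (List String) :=
  countGo [] [] name_list

-- ===== PORT B =====
def count_alt (name_list : List String) : List (List String) :=
  if name_list.all (fun n => PySem.Str.isIn "b" n || PySem.Str.isIn "g" n) then
    [ (name_list.filter (fun n => PySem.Str.isIn "b" n)).map
        (fun n => PySem.Str.slice n none (some (-1))),
      (name_list.filter (fun n => PySem.Str.isIn "g" n && !PySem.Str.isIn "b" n)).map
        (fun n => PySem.Str.slice n none (some (-1))) ]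
  else [[], []]

-- ===== PRECONDITION & SPEC =====
def Spec_count (name_list : List String) (out : List (List String)) : Prop := out = count_alt name_list
instance (name_list : List String) (out : List (List String)) : Decidable (Spec_count name_list out) := by unfold Spec_count; infer_instance

-- ===== CLAIM (what is proved, stated in full; the proofs are below) =====
def Claim_equal_count : Prop := ∀ (name_list : List String), Dom_count name_list → Spec_count name_list (count name_list)

-- ===== LEMMAS AND PROOFS =====
theorem countGo_eq (xs : List String) : ∀ (ms fs : List String),
    countGo ms fs xs =
      if xs.all (fun n => PySem.Str.isIn "b" n || PySem.Str.isIn "g" n) then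
        [ ms ++ (xs.filter (fun n => PySem.Str.isIn "b" n)).map
            (fun n => PySem.Str.slice n none (some (-1))),
          fs ++ (xs.filter (fun n => PySem.Str.isIn "g" n && !PySem.Str.isIn "b" n)).map
            (fun n => PySem.Str.slice n none (some (-1))) ]
      else [[], []] := by
  induction xs with
  | nil => intro ms fs; simp [countGo]
  | cons n rest ih =>
    intro ms fs
    by_cases hb : PySem.Chars.isIn ['b'] n.toList
    · simp [countGo, PySem.Str.isIn, hb, ih, List.all_cons]
    · by_cases hg : PySem.Chars.isIn ['g'] n.toList
      · simp [countGo, PySem.Str.isIn, hb, hg, ih, List.all_cons]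
      · simp [countGo, PySem.Str.isIn, hb, hg, List.all_cons]

-- ===== VERDICT (by name: the statement is the Claim_ definition above) =====
theorem count_spec : Claim_equal_count := by
  intro name_list _
  unfold Spec_count count count_alt
  rw [countGo_eq]
  split_ifs <;> rfl
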